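-- pv_equiv track=rewrite | github.com/Voyadger-Odin/SERVER-CONTRTOL-REF | Tool/static/HTDOCS/test/file.py | formatCarriage
-- ===== SOURCE A (Python) =====
-- def formatCarriage(data):
--     data_lines = data.split('\n')
--
--     result = ''
--     for i in range(len(data_lines)):
--         data_s = data_lines[i].split('\r')
--
--         result_line = ''
--         for line in data_s[::-1]:
--             if len(line) > len(result_line):
--                 result_line += line[len(result_line):]
--
--         if (i > 0):
--             result += '\n'
--         result += result_line
--
--     return result
-- ===== SOURCE B (Python) =====
-- def formatCarriage(data):
--     out = []
--     for line in data.split('\n'):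
--         buf = []
--         for seg in line.split('\r'):
--             buf[:len(seg)] = seg
--         out.append(''.join(buf))
--     return '\n'.join(out)
-- ===== Notes on version B (the rewrite author's own statement) =====
-- stated objective: simpler
-- what changed: Replaces A's reverse-order scan over the carriage-return segments with suffix-extension appends by a forward last-writer-wins overlay into a buffer (slice assignment buf[:len(seg)] = seg), and joins the lines with a single str.join instead of an indexed loop with a separator test on the index.
import Mathlib
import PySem

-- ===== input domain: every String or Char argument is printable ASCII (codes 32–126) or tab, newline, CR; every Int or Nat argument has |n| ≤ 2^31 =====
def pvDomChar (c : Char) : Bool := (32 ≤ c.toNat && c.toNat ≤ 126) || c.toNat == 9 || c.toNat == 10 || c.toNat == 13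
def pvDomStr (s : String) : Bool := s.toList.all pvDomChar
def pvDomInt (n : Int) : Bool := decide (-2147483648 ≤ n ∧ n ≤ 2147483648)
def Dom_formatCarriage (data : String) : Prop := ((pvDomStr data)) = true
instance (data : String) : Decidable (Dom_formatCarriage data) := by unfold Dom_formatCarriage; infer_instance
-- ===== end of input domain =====

-- B builds each displayed line by a forward last-writer-wins overlay into a buffer and joins the lines
-- with a single join, instead of A's reverse scan with suffix appends and an indexed separator-testing loop.

-- ===== PORT A =====
def formatCarriage (data : String) : String :=
  let data_lines := PySem.Chars.splitOn data.toList ['\n']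
  let result := (PySem.List.pyRange 0 (PySem.List.len data_lines) 1).foldl (fun result i =>
    let data_s := PySem.Chars.splitOn (PySem.List.pyGetD data_lines i []) ['\r']
    let result_line := ((PySem.List.slice? data_s none none (-1)).getD []).foldl
      (fun result_line line =>
        if line.length > result_line.length then
          result_line ++ PySem.List.slice line (some (result_line.length : Int)) none
        else result_line) []
    let result := if i > 0 then result ++ ['\n'] else result
    result ++ result_line) []
  String.ofList result

-- ===== PORT B =====
def formatCarriage_alt (data : String) : String :=
  String.ofList (PySem.Chars.join ['\n']
    ((PySem.Chars.splitOn data.toList ['\n']).map (fun line =>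
      (PySem.Chars.splitOn line ['\r']).foldl
        (fun buf seg => seg ++ buf.drop seg.length) [])))

-- ===== PRECONDITION & SPEC =====
def Spec_formatCarriage (data : String) (out : String) : Prop := out = formatCarriage_alt data
instance (data : String) (out : String) : Decidable (Spec_formatCarriage data out) := by unfold Spec_formatCarriage; infer_instance

-- ===== CLAIM (what is proved, stated in full; the proofs are below) =====
def Claim_equal_formatCarriage : Prop := ∀ (data : String), Dom_formatCarriage data → Spec_formatCarriage data (formatCarriage data)

-- ===== LEMMAS AND PROOFS =====

-- A's per-line value: reverse scan over the segments, appending each segment's uncovered suffix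
def aLine (segs : List (List Char)) : List Char :=
  segs.foldr (fun line acc =>
    if line.length > acc.length then acc ++ line.drop acc.length else acc) []

theorem aLine_cons (s : List Char) (t : List (List Char)) :
    aLine (s :: t) = if s.length > (aLine t).length
      then aLine t ++ s.drop (aLine t).length else aLine t := rfl

-- forward overlay onto a buffer equals A's per-line value extended by the buffer's tail
theorem overlay_eq_aLine (segs : List (List Char)) (buf : List Char) :
    segs.foldl (fun b s => s ++ b.drop s.length) buf
      = aLine segs ++ buf.drop (aLine segs).length := by
  induction segs generalizing buf with
  | nil => simp [aLine]
  | cons s t ih =>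
    rw [List.foldl_cons, ih, aLine_cons]
    by_cases h : s.length > (aLine t).length
    · rw [if_pos h, List.drop_append, Nat.sub_eq_zero_of_le (le_of_lt h), List.drop_zero,
        List.append_assoc]
      congr 2
      simp only [List.length_append, List.length_drop]
      congr 1
      omega
    · rw [if_neg h, List.drop_append,
        List.drop_eq_nil_of_le (by omega : (aLine t).length ≥ s.length), List.nil_append,
        List.drop_drop]
      congr 2
      omega

theorem innerA_eq_aLine (segs : List (List Char)) :
    ((PySem.List.slice? segs none none (-1)).getD []).foldl
      (fun result_line line =>
        if line.length > result_line.length then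
          result_line ++ PySem.List.slice line (some (result_line.length : Int)) none
        else result_line) []
      = aLine segs := by
  rw [PySem.List.slice?_none_none_neg_one, Option.getD_some, List.foldl_reverse]
  simp only [PySem.List.slice_from_natCast]
  rfl

theorem innerB_eq_aLine (segs : List (List Char)) :
    segs.foldl (fun buf seg => seg ++ buf.drop seg.length) [] = aLine segs := by
  rw [overlay_eq_aLine]
  simp

theorem foldl_sep_append (g : List Char → List Char) (ls : List (List Char)) (acc : List Char) :
    ls.foldl (fun res l => (res ++ ['\n']) ++ g l) acc
      = acc ++ (ls.map (fun l => '\n' :: g l)).flatten := by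
  induction ls generalizing acc with
  | nil => simp
  | cons y ys ih =>
    rw [List.foldl_cons, ih, List.map_cons, List.flatten_cons]
    simp


theorem join_cons_eq (g : List Char → List Char) (x : List Char) (xs : List (List Char)) :
    PySem.Chars.join ['\n'] ((x :: xs).map g)
      = g x ++ (xs.map (fun l => '\n' :: g l)).flatten := by
  induction xs generalizing x with
  | nil => simp [PySem.Chars.join_singleton]
  | cons y ys ih =>
    rw [List.map_cons, List.map_cons, PySem.Chars.join_cons_cons, ← List.map_cons, ih]
    simp

theorem formatCarriage_spec : Claim_equal_formatCarriage := by
  intro data _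
  show formatCarriage data = formatCarriage_alt data
  unfold formatCarriage formatCarriage_alt
  simp only [innerA_eq_aLine, innerB_eq_aLine]
  congr 1
  cases h : PySem.Chars.splitOn data.toList ['\n'] with
  | nil => simp [PySem.List.pyRange_one_eq_nil, PySem.List.len, PySem.Chars.join_nil]
  | cons x xs =>
    rw [join_cons_eq]
    have hlen : (0 : Int) < PySem.List.len (x :: xs) := by
      simp [PySem.List.len]
    rw [PySem.List.pyRange_one_cons hlen, List.foldl_cons]
    simp only [PySem.List.pyGetD_zero_cons]
    rw [show (if (0 : Int) > 0 then ([] : List Char) ++ ['\n'] else []) = [] by simp,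
      List.nil_append]
    rw [show (0:Int) + 1 = 1 by norm_num]
    rw [PySem.List.foldl_congr_mem _ _
      (fun res i => (res ++ ['\n']) ++ aLine (PySem.Chars.splitOn (PySem.List.pyGetD (x :: xs) i []) ['\r'])) _
      (by
        intro acc i hi
        rw [PySem.List.mem_pyRange_one] at hi
        rw [if_pos (by omega : i > 0)])]
    rw [PySem.List.foldl_pyRange_pyGetD (x :: xs) []
      (fun res line => (res ++ ['\n']) ++ aLine (PySem.Chars.splitOn line ['\r'])) _
      (by norm_num : (0:Int) ≤ 1)]
    simp only [Int.toNat_one, List.drop_one, List.tail_cons]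
    rw [foldl_sep_append]
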